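-- pv_equiv track=rewrite | github.com/ng-dana/The-Game-of-HOG-CS61A | hog.py | free_bacon
-- ===== SOURCE A (Python) =====
-- def free_bacon(score):
--     """Return the points scored from rolling 0 dice (Free Bacon).
--
--     score:  The opponent's current score.
--     """
--     assert score < 100, 'The game should be over.'
--     # BEGIN PROBLEM 2
--
--     cubed = score ** 3
--     n = len(str(cubed)) #number of digits in the cubed score
--
--     total = 0
--
--     digit = cubed // (10 ** (n-1)) #isolates leading digit
--     total = digit #sums of free_bacon rule
--     n -= 1 #goes down one place value
--     minus_first = True #to ensure subtract then add pattern
--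
--     while n != 0:
--         big_val = cubed % (10 ** n) #the original number without it's previous isolated digit
--         digit = big_val // (10 ** (n-1)) #isolates next leading digit
--         n -= 1
--         if minus_first:
--             total -= digit
--         else:
--             total += digit
--         minus_first = not minus_first #go to add case for next digit
--     return int(1 + abs(total))
-- ===== SOURCE B (Python) =====
-- def free_bacon(score):
--     """Return the points scored from rolling 0 dice (Free Bacon).
--
--     score:  The opponent's current score.
--     """
--     assert score < 100, 'The game should be over.'
--     cubed = score ** 3
--     total = 0
--     sign = 1
--     while cubed:
--         total += sign * (cubed % 10)
--         sign = -sign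
--         cubed //= 10
--     return 1 + abs(total)
-- ===== Notes on version B (the rewrite author's own statement) =====
-- stated objective: simpler
-- what changed: B extracts digits LSB-to-MSB with a single while cubed: %10 // 10 loop and an alternating sign accumulator, instead of A's len(str())-based digit count and repeated peeling of the leading digit with 10**n powers; the final abs absorbs the possible overall sign flip, so the result is identical.
-- outside the precondition, e.g. on free_bacon(-2): A returns 4, B does not finish within the time limit
import Mathlib
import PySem

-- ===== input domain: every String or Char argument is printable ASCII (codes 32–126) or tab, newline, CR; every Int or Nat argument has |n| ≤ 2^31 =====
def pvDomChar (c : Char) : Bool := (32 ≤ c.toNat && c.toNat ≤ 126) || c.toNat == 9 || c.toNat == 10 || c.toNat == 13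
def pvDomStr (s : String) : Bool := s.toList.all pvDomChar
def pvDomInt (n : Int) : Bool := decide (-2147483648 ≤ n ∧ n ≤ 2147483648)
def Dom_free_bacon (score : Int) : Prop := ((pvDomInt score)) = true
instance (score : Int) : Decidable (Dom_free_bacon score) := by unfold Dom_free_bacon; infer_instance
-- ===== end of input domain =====

-- B: same Free Bacon value via an LSB-first digit loop with an alternating sign (abs absorbs the sign flip); return-value equivalence proved on 0 <= score < 100.
-- ===== PORT A =====
-- while n != 0 loop of A, fuel = n (the loop variable itself, which A decrements to 0)
def free_bacon_loopA (cubed : Int) : Nat → Int → Bool → Int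
  | 0, total, _ => total
  | n + 1, total, minus_first =>
    let big_val := PySem.Int.mod cubed (10 ^ (n + 1))
    let digit := PySem.Int.floordiv big_val (10 ^ n)
    let total := if minus_first then total - digit else total + digit
    free_bacon_loopA cubed n total (!minus_first)

def free_bacon (score : Int) : Int :=
  let cubed := score ^ 3
  let n : Nat := (PySem.Int.toStr cubed).length   -- len(str(cubed)); ≥ 1, so 10 ** (n-1) never has a negative exponent
  let digit := PySem.Int.floordiv cubed (10 ^ (n - 1))
  let total := digit
  1 + |free_bacon_loopA cubed (n - 1) total true|

-- ===== PORT B =====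
-- while cubed: loop of Source B; on the admitted domain cubed ≥ 0, so %/// agree with Nat arithmetic (exact there)
-- structural fuel recursion; fuel = the initial c is enough since c strictly shrinks each iteration
def free_bacon_loopB : Nat → Nat → Int → Int → Int
  | 0, _, total, _ => total
  | fuel + 1, c, total, sign =>
    if c = 0 then total
    else free_bacon_loopB fuel (c / 10) (total + sign * (c % 10 : Nat)) (-sign)

def free_bacon_alt (score : Int) : Int :=
  let cubed := score ^ 3
  1 + |free_bacon_loopB cubed.toNat cubed.toNat 0 1|

-- ===== PRECONDITION & SPEC =====
-- Pre_ excludes score ≥ 100, where A's assert raises AssertionError, and negative scores, which are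
-- outside the game's natural domain (score is an opponent's game score): there A's digit arithmetic over
-- str(cubed) including the '-' character is accidental and B's while-cubed loop does not terminate.
def Pre_free_bacon (score : Int) : Prop := 0 ≤ score ∧ score < 100
instance (score : Int) : Decidable (Pre_free_bacon score) := by unfold Pre_free_bacon; infer_instance
def pvWitness_free_bacon : Int := (42)
def Spec_free_bacon (score : Int) (out : Int) : Prop := out = free_bacon_alt score
instance (score : Int) (out : Int) : Decidable (Spec_free_bacon score out) := by unfold Spec_free_bacon; infer_instance

-- ===== CLAIM (what is proved, stated in full; the proofs are below) =====
def Claim_equal_free_bacon : Prop := ∀ (score : Int), Dom_free_bacon score → Pre_free_bacon score → Spec_free_bacon score (free_bacon score)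

-- ===== LEMMAS AND PROOFS =====
-- Pre_ admits only the 100 scores 0..99, so the claim reduces to a finite kernel computation.
set_option maxRecDepth 4000 in
theorem free_bacon_all_small : ∀ n ∈ List.range 100, free_bacon (n : Int) = free_bacon_alt (n : Int) := by decide

-- ===== VERDICT (by name: the statement is the Claim_ definition above) =====
theorem free_bacon_spec : Claim_equal_free_bacon := by
  intro score _ hpre
  unfold Spec_free_bacon
  obtain ⟨h0, h100⟩ := hpre
  have hn : score = ((score.toNat : Nat) : Int) := (Int.toNat_of_nonneg h0).symm
  have hmem : score.toNat ∈ List.range 100 := by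
    simp only [List.mem_range]
    omega
  rw [hn]
  exact free_bacon_all_small _ hmem
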